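-- pv_equiv track=rewrite | github.com/pypi-data/pypi-mirror-383 | packages/bsy-clippy/bsy_clippy-0.3.2-py3-none-any.whl/bsy_clippy/cli.py | colorize_response
-- ===== SOURCE A (Python) =====
-- from typing import IO, Dict, List, Optional, Sequence, Tuple
--
-- YELLOW = "\033[93m"
--
-- ANSWER_COLOR = "\033[96m"
--
-- RESET = "\033[0m"
--
-- def colorize_response(text: str) -> str:
--     if not text:
--         return ""
--     idx = 0
--     in_think = False
--     output: List[str] = []
--     while idx < len(text):
--         if in_think:
--             close_idx = text.find("</think>", idx)
--             if close_idx == -1: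
--                 output.append(f"{YELLOW}{text[idx:]}{RESET}")
--                 break
--             if close_idx > idx:
--                 output.append(f"{YELLOW}{text[idx:close_idx]}{RESET}")
--             output.append(f"{YELLOW}</think>{RESET}")
--             idx = close_idx + len("</think>")
--             in_think = False
--         else:
--             open_idx = text.find("<think>", idx)
--             if open_idx == -1:
--                 output.append(f"{ANSWER_COLOR}{text[idx:]}{RESET}")
--                 break
--             if open_idx > idx:
--                 output.append(f"{ANSWER_COLOR}{text[idx:open_idx]}{RESET}")
--             output.append(f"{YELLOW}<think>{RESET}")
--             idx = open_idx + len("<think>")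
--             in_think = True
--     return "".join(output)
-- ===== SOURCE B (Python) =====
-- YELLOW = "\033[93m"
-- ANSWER_COLOR = "\033[96m"
-- RESET = "\033[0m"
--
-- def colorize_response(text: str) -> str:
--     # single character-level pass with a run buffer, instead of repeated find() jumps
--     out = []
--     buf = []
--     def flush(color):
--         if buf:
--             out.append(f"{color}{''.join(buf)}{RESET}")
--             buf.clear()
--     in_think = False
--     i = 0
--     n = len(text)
--     while i < n:
--         if (not in_think) and text.startswith("<think>", i):
--             flush(ANSWER_COLOR)
--             out.append(f"{YELLOW}<think>{RESET}")
--             in_think = True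
--             i += 7
--         elif in_think and text.startswith("</think>", i):
--             flush(YELLOW)
--             out.append(f"{YELLOW}</think>{RESET}")
--             in_think = False
--             i += 8
--         else:
--             buf.append(text[i])
--             i += 1
--     flush(YELLOW if in_think else ANSWER_COLOR)
--     return "".join(out)
-- ===== Notes on version B (the rewrite author's own statement) =====
-- stated objective: alternative
-- what changed: A repeatedly jumps via text.find with slicing per segment; B makes a single character-level pass maintaining an in_think flag and a run buffer, flushing the buffer at genuine state transitions.
import Mathlib
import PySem

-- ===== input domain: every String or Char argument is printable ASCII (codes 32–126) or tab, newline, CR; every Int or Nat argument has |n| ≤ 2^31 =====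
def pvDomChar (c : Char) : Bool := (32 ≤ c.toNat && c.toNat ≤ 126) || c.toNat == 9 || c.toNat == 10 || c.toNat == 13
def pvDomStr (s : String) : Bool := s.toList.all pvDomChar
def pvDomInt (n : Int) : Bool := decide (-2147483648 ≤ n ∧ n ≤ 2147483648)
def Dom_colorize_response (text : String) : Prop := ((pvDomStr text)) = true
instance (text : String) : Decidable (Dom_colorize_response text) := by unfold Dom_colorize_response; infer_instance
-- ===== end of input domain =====

-- B replaces A's repeated find()-and-slice loop by one character-level pass with a run buffer (objective: alternative, same cost).

def pvYellow : String := "\x1b[93m"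
def pvAnswer : String := "\x1b[96m"
def pvReset : String := "\x1b[0m"
def pvOpen : List Char := ['<','t','h','i','n','k','>']
def pvClose : List Char := ['<','/','t','h','i','n','k','>']

-- ===== PORT A =====
-- text.find(pat, idx) ported as a search over the remaining suffix (state idx ↦ suffix)
def pvFind (pat : List Char) : List Char → Option Nat
  | [] => if pat.isPrefixOf ([] : List Char) then some 0 else none
  | c :: t => if pat.isPrefixOf (c :: t) then some 0 else (pvFind pat t).map (· + 1)

def goA (m : Bool) (cs : List Char) (out : List String) : List String :=
  if h : cs = [] then out
  else if m then
    match pvFind pvClose cs with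
    | none => out ++ [pvYellow ++ String.mk cs ++ pvReset]
    | some k =>
      let out2 := if 0 < k then out ++ [pvYellow ++ String.mk (cs.take k) ++ pvReset] else out
      goA false (cs.drop (k + 8)) (out2 ++ [pvYellow ++ "</think>" ++ pvReset])
  else
    match pvFind pvOpen cs with
    | none => out ++ [pvAnswer ++ String.mk cs ++ pvReset]
    | some k =>
      let out2 := if 0 < k then out ++ [pvAnswer ++ String.mk (cs.take k) ++ pvReset] else out
      goA true (cs.drop (k + 7)) (out2 ++ [pvYellow ++ "<think>" ++ pvReset])
termination_by cs.length
decreasing_by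
  all_goals (have := List.length_pos_of_ne_nil h; simp; omega)

def colorize_response (text : String) : String :=
  if text = "" then "" else String.join (goA false text.toList [])

-- ===== PORT B =====
def pvFlush (buf : List Char) (color : String) (out : List String) : List String :=
  if buf = [] then out else out ++ [color ++ String.mk buf ++ pvReset]

def goB (m : Bool) (cs : List Char) (buf : List Char) (out : List String) : List String :=
  match cs with
  | [] => pvFlush buf (if m then pvYellow else pvAnswer) out
  | c :: t =>
    if !m && pvOpen.isPrefixOf (c :: t) then
      goB true ((c :: t).drop 7) [] (pvFlush buf pvAnswer out ++ [pvYellow ++ "<think>" ++ pvReset])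
    else if m && pvClose.isPrefixOf (c :: t) then
      goB false ((c :: t).drop 8) [] (pvFlush buf pvYellow out ++ [pvYellow ++ "</think>" ++ pvReset])
    else
      goB m t (buf ++ [c]) out
termination_by cs.length
decreasing_by all_goals (simp <;> omega)

def colorize_response_alt (text : String) : String :=
  String.join (goB false text.toList [] [])

-- ===== PRECONDITION & SPEC =====
def Spec_colorize_response (text : String) (out : String) : Prop := out = colorize_response_alt text
instance (text : String) (out : String) : Decidable (Spec_colorize_response text out) := by unfold Spec_colorize_response; infer_instance

-- ===== CLAIM (what is proved, stated in full; the proofs are below) =====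
def Claim_equal_colorize_response : Prop := ∀ (text : String), Dom_colorize_response text → Spec_colorize_response text (colorize_response text)

-- ===== LEMMAS AND PROOFS =====

theorem pvFind_none (pat : List Char) (cs : List Char) (h : pvFind pat cs = none) :
    ∀ i, pat.isPrefixOf (cs.drop i) = false := by
  induction cs with
  | nil =>
    intro i
    simp only [pvFind] at h
    split at h
    · exact absurd h (by simp)
    · rename_i hp
      rw [List.drop_nil]
      exact eq_false_of_ne_true hp
  | cons c t ih =>
    simp only [pvFind] at h
    split at h
    · exact absurd h (by simp)
    · rename_i hp
      intro i
      cases i with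
      | zero => simpa using eq_false_of_ne_true hp
      | succ j =>
        have ht : pvFind pat t = none := by
          cases hf : pvFind pat t <;> simp [hf] at h ⊢
        simpa using ih ht j

theorem pvFind_some (pat : List Char) (cs : List Char) (k : Nat) (h : pvFind pat cs = some k) :
    pat.isPrefixOf (cs.drop k) = true ∧ ∀ i < k, pat.isPrefixOf (cs.drop i) = false := by
  induction cs generalizing k with
  | nil =>
    simp only [pvFind] at h
    split at h
    · rename_i hp
      have : k = 0 := by simpa using h.symm
      subst this
      exact ⟨by simpa using hp, by omega⟩
    · exact absurd h (by simp)
  | cons c t ih =>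
    simp only [pvFind] at h
    split at h
    · rename_i hp
      have : k = 0 := by simpa using h.symm
      subst this
      exact ⟨by simpa using hp, by omega⟩
    · rename_i hp
      cases hf : pvFind pat t with
      | none => simp [hf] at h
      | some j =>
        simp [hf] at h
        subst h
        obtain ⟨h1, h2⟩ := ih j hf
        refine ⟨by simpa using h1, ?_⟩
        intro i hi
        cases i with
        | zero => simpa using eq_false_of_ne_true hp
        | succ i' => simpa using h2 i' (by omega)

theorem goB_nil (m : Bool) (buf : List Char) (out : List String) :
    goB m [] buf out = pvFlush buf (if m then pvYellow else pvAnswer) out := by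
  rw [goB]

theorem goB_open (suf buf : List Char) (out : List String) :
    goB false (pvOpen ++ suf) buf out
      = goB true suf [] (pvFlush buf pvAnswer out ++ [pvYellow ++ "<think>" ++ pvReset]) := by
  rw [show pvOpen ++ suf = '<'::'t'::'h'::'i'::'n'::'k'::'>'::suf from rfl]
  rw [goB]
  simp [pvOpen, List.isPrefixOf]

theorem goB_close (suf buf : List Char) (out : List String) :
    goB true (pvClose ++ suf) buf out
      = goB false suf [] (pvFlush buf pvYellow out ++ [pvYellow ++ "</think>" ++ pvReset]) := by
  rw [show pvClose ++ suf = '<'::'/'::'t'::'h'::'i'::'n'::'k'::'>'::suf from rfl]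
  rw [goB]
  simp [pvClose, List.isPrefixOf]

theorem goB_scan (m : Bool) (k : Nat) : ∀ (cs buf : List Char) (out : List String),
    k ≤ cs.length →
    (∀ i < k, (if m then pvClose else pvOpen).isPrefixOf (cs.drop i) = false) →
    goB m cs buf out = goB m (cs.drop k) (buf ++ cs.take k) out := by
  induction k with
  | zero => intro cs buf out _ _; simp
  | succ k ih =>
    intro cs buf out hlen hno
    cases cs with
    | nil => simp at hlen
    | cons c t =>
      have step : goB m (c :: t) buf out = goB m t (buf ++ [c]) out := by
        cases m with
        | false =>
          have h0' : pvOpen.isPrefixOf (c :: t) = false := by simpa using hno 0 (by omega)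
          rw [goB]; simp [h0']
        | true =>
          have h0' : pvClose.isPrefixOf (c :: t) = false := by simpa using hno 0 (by omega)
          rw [goB]; simp [h0']
      rw [step, ih t (buf ++ [c]) out (by simpa using hlen)
        (by intro i hi; simpa using hno (i + 1) (by omega))]
      simp

theorem main_lemma (n : Nat) : ∀ (cs : List Char), cs.length ≤ n → ∀ (m : Bool) (out : List String),
    goA m cs out = goB m cs [] out := by
  induction n with
  | zero =>
    intro cs hlen m out
    have : cs = [] := by cases cs <;> simp_all
    subst this
    rw [goA, goB_nil]
    simp [pvFlush]
  | succ n ih =>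
    intro cs hlen m out
    by_cases hnil : cs = []
    · subst hnil; rw [goA, goB_nil]; simp [pvFlush]
    · have hpos : 0 < cs.length := List.length_pos_of_ne_nil hnil
      cases m with
      | true =>
        rw [goA, dif_neg hnil, if_pos rfl]
        cases hf : pvFind pvClose cs with
        | none =>
          have hall := pvFind_none pvClose cs hf
          rw [goB_scan true cs.length cs [] out le_rfl (by intro i _; simpa using hall i)]
          simp [List.drop_length, List.take_length, goB_nil, pvFlush, hnil]
        | some k =>
          obtain ⟨h1, h2⟩ := pvFind_some pvClose cs k hf
          have hklt : k < cs.length := by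
            by_contra hk
            have : cs.drop k = [] := List.drop_eq_nil_of_le (by omega)
            rw [this] at h1
            simp [pvClose] at h1
          obtain ⟨s, hs⟩ := List.isPrefixOf_iff_prefix.mp h1
          have hsfull : cs.drop (k + 8) = s := by
            have h8 : (cs.drop k).drop 8 = s := by rw [← hs]; simp [pvClose]
            rw [← List.drop_drop, h8]
          have hslen : s.length ≤ n := by
            have := congrArg List.length hsfull
            simp at this
            omega
          rw [goB_scan true k cs [] out (le_of_lt hklt) (by intro i hi; simpa using h2 i hi)]
          rw [List.nil_append, ← hs, goB_close]
          have hout : (if 0 < k then out ++ [pvYellow ++ String.mk (cs.take k) ++ pvReset] else out)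
              = pvFlush (cs.take k) pvYellow out := by
            unfold pvFlush
            by_cases hk0 : k = 0
            · subst hk0; simp
            · rw [if_pos (by omega), if_neg (by simp [List.take_eq_nil_iff, hk0, hnil])]
          simp only [hout, hsfull]
          exact ih s hslen false _
      | false =>
        rw [goA, dif_neg hnil, if_neg (by simp)]
        cases hf : pvFind pvOpen cs with
        | none =>
          have hall := pvFind_none pvOpen cs hf
          rw [goB_scan false cs.length cs [] out le_rfl (by intro i _; simpa using hall i)]
          simp [List.drop_length, List.take_length, goB_nil, pvFlush, hnil]
        | some k =>
          obtain ⟨h1, h2⟩ := pvFind_some pvOpen cs k hf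
          have hklt : k < cs.length := by
            by_contra hk
            have : cs.drop k = [] := List.drop_eq_nil_of_le (by omega)
            rw [this] at h1
            simp [pvOpen] at h1
          obtain ⟨s, hs⟩ := List.isPrefixOf_iff_prefix.mp h1
          have hsfull : cs.drop (k + 7) = s := by
            have h7 : (cs.drop k).drop 7 = s := by rw [← hs]; simp [pvOpen]
            rw [← List.drop_drop, h7]
          have hslen : s.length ≤ n := by
            have := congrArg List.length hsfull
            simp at this
            omega
          rw [goB_scan false k cs [] out (le_of_lt hklt) (by intro i hi; simpa using h2 i hi)]
          rw [List.nil_append, ← hs, goB_open]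
          have hout : (if 0 < k then out ++ [pvAnswer ++ String.mk (cs.take k) ++ pvReset] else out)
              = pvFlush (cs.take k) pvAnswer out := by
            unfold pvFlush
            by_cases hk0 : k = 0
            · subst hk0; simp
            · rw [if_pos (by omega), if_neg (by simp [List.take_eq_nil_iff, hk0, hnil])]
          simp only [hout, hsfull]
          exact ih s hslen true _

-- ===== VERDICT (by name: the statement is the Claim_ definition above) =====
theorem colorize_response_spec : Claim_equal_colorize_response := by
  intro text _
  unfold Spec_colorize_response colorize_response colorize_response_alt
  by_cases h : text = ""
  · subst h
    rw [if_pos rfl, show ("" : String).toList = [] from rfl, goB_nil]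
    simp [pvFlush]
    rfl
  · rw [if_neg h]
    rw [main_lemma text.toList.length text.toList le_rfl false []]
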